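-- pv_equiv track=rewrite | github.com/su-ntu-ctp/5m-data-1.1-intro-data-science | assignment.py | count_repeats
-- ===== SOURCE A (Python) =====
-- def count_repeats(string):
--     """Returns the number of repeated characters in a string.
--     >>> count_repeats("hello")
--     2
--     >>> count_repeats("aeiou")
--     0
--     """
--
--     char_count_dict = {} # creates a dictionary of the characters to count the number of times the character appears
--     for x in string:
--         if x in char_count_dict: # check if the character is already in the dictionary
--             char_count_dict[x] += 1 # increment if it has already appeared previously
--         else:
--             char_count_dict[x] = 1 # initialize to 1 if this is the first time it appears
--
--     num_char_repeats = 0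
--     for x in char_count_dict.values():
--         if x > 1:
--             num_char_repeats += x # not sure why repeated characters are counted by the number of times it appears. Shouldn't the it be counted as one regardless of how many times it appears?
--
--     return (num_char_repeats)
-- ===== SOURCE B (Python) =====
-- def count_repeats(string):
--     s = sorted(string)
--     total = 0
--     i = 0
--     n = len(s)
--     while i < n:
--         j = i + 1
--         while j < n and s[j] == s[i]:
--             j += 1
--         if j - i > 1:
--             total += j - i
--         i = j
--     return total
-- ===== Notes on version B (the rewrite author's own statement) =====
-- stated objective: alternative
-- what changed: B sorts the characters and sums the lengths of consecutive equal runs longer than 1, with no frequency dictionary at all.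
import Mathlib
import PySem

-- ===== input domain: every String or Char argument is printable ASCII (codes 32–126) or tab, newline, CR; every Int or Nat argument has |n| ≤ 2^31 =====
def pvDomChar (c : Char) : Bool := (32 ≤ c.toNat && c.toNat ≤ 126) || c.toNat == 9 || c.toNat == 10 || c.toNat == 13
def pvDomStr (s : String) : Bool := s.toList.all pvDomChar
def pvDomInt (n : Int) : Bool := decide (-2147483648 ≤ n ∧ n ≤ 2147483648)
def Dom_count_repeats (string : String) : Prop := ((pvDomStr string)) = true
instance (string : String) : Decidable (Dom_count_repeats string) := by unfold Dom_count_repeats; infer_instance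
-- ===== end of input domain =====

-- B replaces A's frequency dictionary by sorting the characters and summing consecutive equal runs of length > 1 (alternative algorithm, same result).

-- ===== PORT A =====
def count_repeats (string : String) : Int :=
  let d := string.toList.foldl
    (fun d x => if d.contains x then d.insert x (d.getD x 0 + 1) else d.insert x 1)
    (PySem.Dict.empty : PySem.Dict Char Int)
  d.values.foldl (fun acc x => if x > 1 then acc + x else acc) 0

-- ===== PORT B =====
-- run-length walk over the sorted characters (the inner 'while j < n and s[j] == s[i]' is the takeWhile)
def pvRunWalk (l : List Char) : Int :=
  match l with
  | [] => 0
  | c :: rest =>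
    let run := rest.takeWhile (fun x => x == c)
    let n := run.length + 1
    (if n > 1 then (n : Int) else 0) + pvRunWalk (rest.dropWhile (fun x => x == c))
termination_by l.length
decreasing_by
  simp only [List.length_cons]
  exact Nat.lt_succ_of_le (List.length_dropWhile_le _ _)

def count_repeats_alt (string : String) : Int :=
  pvRunWalk (PySem.List.sorted string.toList (fun x => x) false)

-- ===== PRECONDITION & SPEC =====
def Spec_count_repeats (string : String) (out : Int) : Prop := out = count_repeats_alt string
instance (string : String) (out : Int) : Decidable (Spec_count_repeats string out) := by unfold Spec_count_repeats; infer_instance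

-- ===== CLAIM (what is proved, stated in full; the proofs are below) =====
def Claim_equal_count_repeats : Prop := ∀ (string : String), Dom_count_repeats string → Spec_count_repeats string (count_repeats string)

-- ===== LEMMAS AND PROOFS =====

-- the canonical value both sides are proved equal to: per distinct character, its count if > 1
def pvG (m : List Char) (c : Char) : Int := if (m.count c : Int) > 1 then (m.count c : Int) else 0

-- A's counting loop is exactly the counter fold
lemma pvA_fold_eq_counter (l : List Char) :
    l.foldl (fun d x => if d.contains x then d.insert x (d.getD x 0 + 1) else d.insert x 1)
      (PySem.Dict.empty : PySem.Dict Char Int)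
    = PySem.Dict.counter l := by
  have hfun : (fun (d : PySem.Dict Char Int) x =>
      if d.contains x then d.insert x (d.getD x 0 + 1) else d.insert x 1)
      = fun d x => d.insert x (d.getD x 0 + 1) := by
    funext d x
    by_cases h : d.contains x
    · simp [h]
    · have h' : d.contains x = false := by simpa using h
      simp [h', PySem.Dict.getD_of_not_contains d (0 : Int) h']
  rw [hfun, PySem.Dict.foldl_insert_getD_add_one_eq_counter]

-- A's summing loop
lemma pvA_sum_fold (u : List Int) (acc : Int) :
    u.foldl (fun acc x => if x > 1 then acc + x else acc) acc
    = acc + (u.map (fun x => if x > 1 then x else 0)).sum := by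
  induction u generalizing acc with
  | nil => simp
  | cons x t ih =>
    simp only [List.foldl_cons, List.map_cons, List.sum_cons, ih]
    by_cases h : x > 1 <;> simp [h, add_assoc, add_comm, add_left_comm]

lemma pvA_eq_sum (s : String) :
    count_repeats s = ∑ c ∈ s.toList.toFinset, pvG s.toList c := by
  have hfs : (PySem.Set.ofList s.toList : List Char).toFinset = s.toList.toFinset := by
    ext y; simp [PySem.Set.mem_ofList]
  simp only [count_repeats, pvA_fold_eq_counter, PySem.Dict.values,
    PySem.Dict.items_counter, List.map_map, pvA_sum_fold, zero_add]
  rw [← hfs, List.sum_toFinset _ (PySem.Set.nodup_ofList _)]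
  congr 1

-- sorted walk lemma
-- elements left by dropWhile (== c) in a sorted list all differ from c
lemma pvDrop_ne (c : Char) : ∀ (r : List Char), r.Pairwise (· ≤ ·) → (∀ y ∈ r, c ≤ y) →
    ∀ x ∈ r.dropWhile (fun x => x == c), x ≠ c := by
  intro r
  induction r with
  | nil => simp
  | cons a t ihr =>
    intro hp hcle x hx
    rw [List.dropWhile_cons] at hx
    by_cases ha : (a == c) = true
    · rw [if_pos ha] at hx
      exact ihr hp.tail (fun y hy => hcle y (List.mem_cons_of_mem _ hy)) x hx
    · rw [if_neg ha] at hx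
      have hane : a ≠ c := by simpa using ha
      have hca : c < a := lt_of_le_of_ne (hcle a (List.mem_cons_self)) (Ne.symm hane)
      rcases List.mem_cons.1 hx with rfl | hx
      · exact hane
      · have : a ≤ x := (List.pairwise_cons.1 hp).1 x hx
        exact fun h => absurd (h ▸ this) (not_le.2 hca)

lemma pvRunWalk_eq_sum_aux : ∀ (n : Nat) (m : List Char), m.length ≤ n → m.Pairwise (· ≤ ·) →
    pvRunWalk m = ∑ c ∈ m.toFinset, pvG m c := by
  intro n
  induction n with
  | zero =>
    intro m hm _
    have : m = [] := List.eq_nil_of_length_eq_zero (Nat.le_zero.1 hm)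
    subst this; simp [pvRunWalk]
  | succ n ih =>
    intro m hm hs
    match m with
    | [] => simp [pvRunWalk]
    | c :: rest =>
      have hc_le : ∀ x ∈ rest, c ≤ x := (List.pairwise_cons.1 hs).1
      have hrest : rest.Pairwise (· ≤ ·) := (List.pairwise_cons.1 hs).2
      set tk := rest.takeWhile (fun x => x == c) with htk
      set dr := rest.dropWhile (fun x => x == c) with hdr
      have hsplit : tk ++ dr = rest := List.takeWhile_append_dropWhile
      have htkc : ∀ x ∈ tk, x = c := fun x hx => by
        have := List.mem_takeWhile_imp hx; simpa using this
      have hdrne : ∀ x ∈ dr, x ≠ c := pvDrop_ne c rest hrest hc_le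
      have hcnotdr : c ∉ dr := fun h => hdrne c h rfl
      -- counts
      have hcount_c : (c :: rest).count c = tk.length + 1 := by
        rw [← hsplit, List.count_cons_self, List.count_append]
        rw [List.count_eq_length.2 (fun b hb => (htkc b hb).symm),
          List.count_eq_zero.2 hcnotdr]
      have hcount_ne : ∀ x, x ≠ c → (c :: rest).count x = dr.count x := by
        intro x hx
        rw [← hsplit, List.count_cons_of_ne hx.symm, List.count_append,
          List.count_eq_zero.2 (fun h => hx (htkc x h))]
        omega
      -- finset
      have hfs : (c :: rest).toFinset = insert c dr.toFinset := by
        ext y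
        simp only [← hsplit, List.toFinset_cons, List.toFinset_append, Finset.mem_insert,
          Finset.mem_union, List.mem_toFinset]
        constructor
        · rintro (rfl | hy | hy)
          · exact Or.inl rfl
          · exact Or.inl (htkc y hy)
          · exact Or.inr hy
        · rintro (rfl | hy)
          · exact Or.inl rfl
          · exact Or.inr (Or.inr hy)
      have hcfin : c ∉ dr.toFinset := by simpa [List.mem_toFinset] using hcnotdr
      -- sizes for the IH
      have hdrlen : dr.length ≤ n := by
        have h1 : dr.length ≤ rest.length := List.length_dropWhile_le _ _
        have h2 : rest.length + 1 ≤ n + 1 := by simpa using hm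
        omega
      have hdrp : dr.Pairwise (· ≤ ·) := List.Pairwise.sublist (List.dropWhile_sublist _) hrest
      rw [pvRunWalk]
      simp only [← htk, ← hdr]
      rw [ih dr hdrlen hdrp, hfs, Finset.sum_insert hcfin]
      have hgc : pvG (c :: rest) c = (if tk.length + 1 > 1 then ((tk.length + 1 : Nat) : Int) else 0) := by
        unfold pvG
        rw [hcount_c]
        split_ifs with h1 h2 h2 <;> first | rfl | (exfalso; omega)
      have hsum : (∑ c' ∈ dr.toFinset, pvG (c :: rest) c') = ∑ c' ∈ dr.toFinset, pvG dr c' := by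
        refine Finset.sum_congr rfl (fun y hy => ?_)
        have hyne : y ≠ c := hdrne y (List.mem_toFinset.1 hy)
        unfold pvG
        rw [hcount_ne y hyne]
      rw [hgc, hsum]

lemma pvRunWalk_eq_sum (m : List Char) (hs : m.Pairwise (· ≤ ·)) :
    pvRunWalk m = ∑ c ∈ m.toFinset, pvG m c :=
  pvRunWalk_eq_sum_aux m.length m le_rfl hs

lemma pvSum_perm {m m' : List Char} (hp : m.Perm m') :
    (∑ c ∈ m.toFinset, pvG m c) = ∑ c ∈ m'.toFinset, pvG m' c := by
  rw [List.toFinset_eq_of_perm _ _ hp]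
  exact Finset.sum_congr rfl (fun c _ => by unfold pvG; rw [hp.count_eq])

-- ===== VERDICT (by name: the statement is the Claim_ definition above) =====
theorem count_repeats_spec : Claim_equal_count_repeats := by
  intro s _
  unfold Spec_count_repeats count_repeats_alt
  have hperm := PySem.List.sorted_perm s.toList (fun x => x) false
  rw [pvA_eq_sum, pvRunWalk_eq_sum _ ?hp, pvSum_perm hperm]
  case hp =>
    have := PySem.List.sorted_pairwise (xs := s.toList) (key := fun x => x)
    simpa using this
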